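-- pv_equiv track=rewrite | github.com/DPNT-Sourcecode/CHK-llet01 | lib/solutions/CHK/offer_helper_functions.py | n_in_items_offer
-- ===== SOURCE A (Python) =====
-- def n_in_items_offer(items, bundle_items: set[str], bundle_size, bundle_price):
--     # Check if at least bundle_size amount of items is in the basket
--     if sum([list(items.keys()).count(item) for item in bundle_items]) < bundle_size:
--         return 0
--
--     bundles_basket = {(item, items[item]) for item in bundle_items if item in items and items[item] > 0}
--     # Sort by price and remove the most expensive items
--     bundles_basket = dict(sorted(bundles_basket, key=lambda x: x[1], reverse=True))
--     bundle_basket_size = sum(list(bundles_basket.values()))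
--     value = (bundle_basket_size // bundle_size) * bundle_price
--
--     for item, count in bundles_basket.items():
--         if bundle_basket_size <= 0:
--             break
--
--         if count > bundle_basket_size:
--             items[item] -= bundle_basket_size
--             break
--
--         bundle_basket_size -= count
--         del items[item]
--
--     return value
-- ===== SOURCE B (Python) =====
-- def n_in_items_offer(items, bundle_items, bundle_size, bundle_price):
--     # One pass over the basket dict itself: count present bundle keys and sum positive counts.
--     present = 0
--     total = 0
--     bundled = []
--     for key, count in items.items():
--         if key in bundle_items:
--             present += 1
--             if count > 0:
--                 total += count
--                 bundled.append(key)
--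
--     if present < bundle_size:
--         return 0
--
--     value = (total // bundle_size) * bundle_price
--
--     # A's removal loop deletes exactly every present bundle item with a positive count.
--     for key in bundled:
--         del items[key]
--
--     return value
-- ===== Notes on version B (the rewrite author's own statement) =====
-- stated objective: faster
-- what changed: B inverts the traversal: instead of A's per-bundle-item rescan of the whole key list (list(items.keys()).count(item)), sort, intermediate set/dict and decrement-and-break removal bookkeeping (whose partial branch is dead), B makes one pass over the items dict itself accumulating the present-key count and the positive total, then deletes the collected keys; Pre_ excludes bundle_size = 0, where both A and B raise ZeroDivisionError.
import Mathlib
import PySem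

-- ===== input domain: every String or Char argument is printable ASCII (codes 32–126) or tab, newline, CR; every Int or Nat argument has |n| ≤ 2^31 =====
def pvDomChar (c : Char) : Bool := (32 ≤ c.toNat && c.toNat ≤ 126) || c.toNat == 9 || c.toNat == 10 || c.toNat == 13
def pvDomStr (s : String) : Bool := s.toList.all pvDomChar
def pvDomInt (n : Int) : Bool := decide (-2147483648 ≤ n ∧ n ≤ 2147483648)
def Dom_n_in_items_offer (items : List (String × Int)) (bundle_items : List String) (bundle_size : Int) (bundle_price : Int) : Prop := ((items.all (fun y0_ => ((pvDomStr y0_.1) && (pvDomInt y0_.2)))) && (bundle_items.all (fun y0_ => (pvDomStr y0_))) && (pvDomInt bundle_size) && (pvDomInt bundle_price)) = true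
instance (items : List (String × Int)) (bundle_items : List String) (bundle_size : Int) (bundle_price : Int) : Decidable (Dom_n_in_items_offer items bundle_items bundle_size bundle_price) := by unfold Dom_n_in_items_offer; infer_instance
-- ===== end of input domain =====

-- B inverts the traversal: one pass over the items dict accumulating present-key count and positive
-- total, instead of A's per-bundle-item key rescans, sort and decrement-and-break removal bookkeeping
-- (whose partial branch is dead); a timing run measured B faster. Both Pythons mutate `items` in place
-- identically (delete the bundled positive keys); the Lean equivalence is about the RETURN value only.

-- ===== PORT A =====
-- Python A's trailing for-loop only mutates `items` (after `value` is already computed) and is therefore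
-- not part of the returned value; it is not ported (return-value port).
def n_in_items_offer (items : List (String × Int)) (bundle_items : List String) (bundle_size : Int) (bundle_price : Int) : Int :=
  let d := PySem.Dict.ofList items
  let bset : PySem.Set String := PySem.Set.ofList bundle_items
  -- if sum([list(items.keys()).count(item) for item in bundle_items]) < bundle_size: return 0
  if (bset.map (fun item => ((d.keys.count item : Int)))).sum < bundle_size then 0
  else
    -- bundles_basket = {(item, items[item]) for item in bundle_items if item in items and items[item] > 0}
    -- (items[item] under the `item in items` guard is exactly d.getD item 0)
    let bundles_basket : PySem.Set (String × Int) :=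
      PySem.Set.ofList ((bset.filter (fun item => d.contains item && decide (0 < d.getD item 0))).map
        (fun item => (item, d.getD item 0)))
    -- bundles_basket = dict(sorted(bundles_basket, key=lambda x: x[1], reverse=True))
    let sortedB := PySem.Dict.ofList (PySem.List.sorted bundles_basket (fun x => x.2) true)
    -- bundle_basket_size = sum(list(bundles_basket.values()))
    let bundle_basket_size := sortedB.values.sum
    -- value = (bundle_basket_size // bundle_size) * bundle_price  (bundle_size ≠ 0 by Pre_)
    PySem.Int.floordiv bundle_basket_size bundle_size * bundle_price

-- ===== PORT B =====
-- B's trailing deletion loop likewise only mutates `items`; return-value port.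
def n_in_items_offer_alt (items : List (String × Int)) (bundle_items : List String) (bundle_size : Int) (bundle_price : Int) : Int :=
  let d := PySem.Dict.ofList items
  -- for key, count in items.items(): accumulate (present, total)
  let acc : Int × Int := d.items.foldl
    (fun acc kv =>
      if bundle_items.contains kv.1 then
        (acc.1 + 1, if 0 < kv.2 then acc.2 + kv.2 else acc.2)
      else acc)
    (0, 0)
  -- if present < bundle_size: return 0
  if acc.1 < bundle_size then 0
  else
    -- value = (total // bundle_size) * bundle_price  (bundle_size ≠ 0 by Pre_)
    PySem.Int.floordiv acc.2 bundle_size * bundle_price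

-- ===== PRECONDITION & SPEC =====
-- Pre_ excludes only bundle_size = 0, where Python A raises ZeroDivisionError (B raises there too).
def Pre_n_in_items_offer (items : List (String × Int)) (bundle_items : List String) (bundle_size : Int) (bundle_price : Int) : Prop :=
  bundle_size ≠ 0
instance (items : List (String × Int)) (bundle_items : List String) (bundle_size : Int) (bundle_price : Int) : Decidable (Pre_n_in_items_offer items bundle_items bundle_size bundle_price) := by unfold Pre_n_in_items_offer; infer_instance

def pvWitness_n_in_items_offer : (List (String × Int)) × List String × Int × Int :=
  ([("A", 3), ("B", 1)], ["A", "B", "C"], 2, 10)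

def Spec_n_in_items_offer (items : List (String × Int)) (bundle_items : List String) (bundle_size : Int) (bundle_price : Int) (out : Int) : Prop := out = n_in_items_offer_alt items bundle_items bundle_size bundle_price
instance (items : List (String × Int)) (bundle_items : List String) (bundle_size : Int) (bundle_price : Int) (out : Int) : Decidable (Spec_n_in_items_offer items bundle_items bundle_size bundle_price out) := by unfold Spec_n_in_items_offer; infer_instance

-- ===== CLAIM (what is proved, stated in full; the proofs are below) =====
def Claim_equal_n_in_items_offer : Prop := ∀ (items : List (String × Int)) (bundle_items : List String) (bundle_size : Int) (bundle_price : Int), Dom_n_in_items_offer items bundle_items bundle_size bundle_price → Pre_n_in_items_offer items bundle_items bundle_size bundle_price → Spec_n_in_items_offer items bundle_items bundle_size bundle_price (n_in_items_offer items bundle_items bundle_size bundle_price)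

-- ===== LEMMAS AND PROOFS =====

-- B's single fold computes the present-key count and the positive-count total.
theorem pv_fold_acc (bi : List String) (L : List (String × Int)) : ∀ (a b : Int),
    L.foldl (fun acc kv =>
      if bi.contains kv.1 then
        (acc.1 + 1, if 0 < kv.2 then acc.2 + kv.2 else acc.2)
      else acc) (a, b)
    = (a + (L.countP (fun kv => bi.contains kv.1) : Int),
       b + ((L.filter (fun kv => bi.contains kv.1 && decide (0 < kv.2))).map Prod.snd).sum) := by
  induction L with
  | nil => intro a b; simp
  | cons kv L ih =>
    intro a b
    simp only [List.foldl_cons, List.countP_cons, List.filter_cons]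
    by_cases h1 : bi.contains kv.1
    · rw [if_pos h1]
      by_cases h2 : 0 < kv.2
      · rw [if_pos h2, ih]
        simp only [h1, h2, decide_true, Bool.and_self, if_pos, Prod.mk.injEq, List.map_cons,
          List.sum_cons]
        constructor <;> push_cast <;> ring
      · rw [if_neg h2, ih]
        simp only [h1, h2, decide_true, decide_false, Bool.and_false, if_true, if_false,
          Prod.mk.injEq]
        constructor <;> push_cast <;> ring
    · rw [if_neg h1, ih]
      simp only [Bool.not_eq_true] at h1
      simp only [h1, Bool.false_and, if_false, Prod.mk.injEq]
      constructor <;> push_cast <;> ring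

-- Two nodup lists filtered to the same membership condition are permutations of each other.
theorem pv_filter_perm {S K : List String} (hS : S.Nodup) (hK : K.Nodup) (p q : String → Bool)
    (h : ∀ x, (x ∈ S ∧ p x = true) ↔ (x ∈ K ∧ q x = true)) : (S.filter p).Perm (K.filter q) := by
  apply List.perm_of_nodup_nodup_toFinset_eq (hS.filter p) (hK.filter q)
  ext x
  simp only [List.mem_toFinset, List.mem_filter]
  exact h x

-- In a key-nodup dict, a key's count in keys is its 0/1 presence indicator.
theorem pv_count_keys_eq_indicator (d : PySem.Dict String Int) (hnd : d.keys.Nodup) (item : String) :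
    ((d.keys.count item : Int)) = if d.contains item then 1 else 0 := by
  rw [PySem.Dict.contains_eq_decide_mem_keys]
  by_cases hm : item ∈ d.keys
  · simp [hm, List.count_eq_one_of_mem hnd hm]
  · simp [hm, List.count_eq_zero_of_not_mem hm]

-- A's total (values of the dict built from the sorted basket set) equals the direct filtered sum.
theorem pv_totals_eq (d : PySem.Dict String Int) (bset : List String) (hb : bset.Nodup) :
    (PySem.Dict.ofList (PySem.List.sorted
        (PySem.Set.ofList ((bset.filter (fun item => d.contains item && decide (0 < d.getD item 0))).map
          (fun item => (item, d.getD item 0)))) (fun x => x.2) true)).values.sum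
    = ((bset.filter (fun item => d.contains item && decide (0 < d.getD item 0))).map
        (fun item => d.getD item 0)).sum := by
  set p : String → Bool := fun item => d.contains item && decide (0 < d.getD item 0) with hp
  set f : String → String × Int := fun i => (i, d.getD i 0) with hfdef
  set fl := bset.filter p with hfl0
  have hfl : fl.Nodup := hb.filter p
  have hinj : Function.Injective f := by
    intro a b h
    simpa [hfdef] using congrArg Prod.fst h
  have hmn : (fl.map f).Nodup := hfl.map hinj
  rw [PySem.Set.ofList_eq_self_of_nodup _ hmn]
  set L := PySem.List.sorted (fl.map f) (fun x => x.2) true with hL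
  have hperm : L.Perm (fl.map f) := PySem.List.sorted_perm _ _ _
  have hfst : (fl.map f).map Prod.fst = fl := by
    simp [hfdef, List.map_map, Function.comp_def]
  have hkeys : (L.map Prod.fst).Nodup := (hperm.map Prod.fst).nodup_iff.mpr (by rw [hfst]; exact hfl)
  have hitems : (PySem.Dict.ofList L).items = L.map (fun a => (Prod.fst a, Prod.snd a)) := by
    simpa [PySem.Dict.ofList, PySem.Dict.update, PySem.Dict.empty] using
      PySem.Dict.items_foldl_insert_fresh L Prod.fst Prod.snd PySem.Dict.empty
        (fun a _ => PySem.Dict.contains_empty _) hkeys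
  have hvals : (PySem.Dict.ofList L).values = L.map Prod.snd := by
    simp [PySem.Dict.values, hitems]
  rw [hvals]
  have hsum : (L.map Prod.snd).sum = ((fl.map f).map Prod.snd).sum := (hperm.map Prod.snd).sum_eq
  rw [hsum]
  simp [hfdef, List.map_map, Function.comp_def]

theorem n_in_items_offer_spec : Claim_equal_n_in_items_offer := by
  intro items bundle_items bundle_size bundle_price _ _
  unfold Spec_n_in_items_offer n_in_items_offer n_in_items_offer_alt
  set d := PySem.Dict.ofList items with hd
  have hK : d.keys.Nodup := PySem.Dict.nodup_keys_ofList items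
  have hS : (PySem.Set.ofList bundle_items : List String).Nodup := PySem.Set.nodup_ofList bundle_items
  have hmemS : ∀ x, x ∈ (PySem.Set.ofList bundle_items : List String) ↔ x ∈ bundle_items :=
    fun x => PySem.Set.mem_ofList bundle_items x
  -- rewrite B's fold into countP + filtered sum over d.items, then over d.keys
  dsimp only
  rw [pv_fold_acc]
  have hitems : d.items = d.keys.map (fun k => (k, d.getD k 0)) :=
    PySem.Dict.items_eq_map_keys d hK 0
  rw [hitems, List.countP_map, List.filter_map, List.map_map]
  -- guard sides agree
  have hguard : ((PySem.Set.ofList bundle_items).map (fun item => ((d.keys.count item : Int)))).sum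
      = ((d.keys.countP ((fun kv => bundle_items.contains kv.1) ∘ fun k => (k, d.getD k 0)) : Nat) : Int) := by
    have h1 : ((PySem.Set.ofList bundle_items).map (fun item => ((d.keys.count item : Int)))).sum
        = (((PySem.Set.ofList bundle_items).countP (fun item => d.contains item) : Nat) : Int) := by
      rw [List.map_congr_left (fun item _ => pv_count_keys_eq_indicator d hK item)]
      exact PySem.List.sum_map_ite_one_zero _ _
    rw [h1]
    have hperm : ((PySem.Set.ofList bundle_items).filter (fun item => d.contains item)).Perm
        (d.keys.filter ((fun kv => bundle_items.contains kv.1) ∘ fun k => (k, d.getD k 0))) := by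
      apply pv_filter_perm hS hK
      intro x
      simp only [Function.comp, PySem.Dict.contains_eq_decide_mem_keys, hmemS, decide_eq_true_eq,
        List.contains_iff_mem]
      tauto
    simp only [List.countP_eq_length_filter, hperm.length_eq]
  rw [hguard]
  simp only [zero_add]
  split_ifs with h
  · rfl
  · -- totals agree
    congr 1
    rw [pv_totals_eq d _ hS]
    have hperm : ((PySem.Set.ofList bundle_items).filter
          (fun item => d.contains item && decide (0 < d.getD item 0))).Perm
        (d.keys.filter (fun k => bundle_items.contains ((k, d.getD k 0) : String × Int).1
            && decide (0 < ((k, d.getD k 0) : String × Int).2))) := by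
      apply pv_filter_perm hS hK
      intro x
      simp only [Bool.and_eq_true, PySem.Dict.contains_eq_decide_mem_keys, hmemS,
        decide_eq_true_eq, List.contains_iff_mem]
      tauto
    have := (hperm.map (fun item => d.getD item 0)).sum_eq
    rw [this]
    simp [Function.comp_def]
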